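-- pv_equiv track=rewrite | github.com/BrettRey/erdos-problem-993 | targeted.py | make_T_m_t_d
-- ===== SOURCE A (Python) =====
-- def make_T_m_t_d(m: int, t: int, d: int) -> tuple[int, list[list[int]]]:
--     """Generalized spherically symmetric tree with depth d.
--
--     Structure: root has m children, each has t children, and so on
--     for d levels. At the deepest level, each vertex has 1 child (leaf).
--
--     This generalizes T_{m,t,1} to deeper trees.
--     """
--     adj: list[list[int]] = [[]]
--     # BFS-style construction
--     current_layer = [0]
--     for level in range(d):
--         next_layer = []
--         if level == 0:
--             branching_factor = m
--         else:
--             branching_factor = t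
--         for v in current_layer:
--             for _ in range(branching_factor):
--                 u = len(adj)
--                 adj.append([])
--                 adj[v].append(u)
--                 adj[u].append(v)
--                 next_layer.append(u)
--         current_layer = next_layer
--
--     # Final layer: each gets 1 leaf child
--     for v in current_layer:
--         u = len(adj)
--         adj.append([])
--         adj[v].append(u)
--         adj[u].append(v)
--
--     return len(adj), adj
-- ===== SOURCE B (Python) =====
-- def make_T_m_t_d(m: int, t: int, d: int) -> tuple[int, list[list[int]]]:
--     """Closed-form rebuild: compute layer sizes and start offsets by prefix
--     sums, then emit each adjacency row independently as a pure function of the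
--     node index (layer found by ranking the index among the start boundaries;
--     parent and children obtained by index arithmetic).  No stateful BFS, no
--     mutation of previously emitted rows."""
--     bf = [m if k == 0 else t for k in range(max(d, 0))] + [1]
--     sizes = [1]
--     for b in bf:
--         sizes.append(sizes[-1] * max(b, 0))
--     starts = [0]
--     for s in sizes:
--         starts.append(starts[-1] + s)
--     n = starts[-1]
--
--     def row(i: int) -> list[int]:
--         k = sum(1 for s in starts[1:] if s <= i)   # layer of node i
--         off = i - starts[k]                        # offset within its layer
--         r = [] if k == 0 else [starts[k - 1] + off // bf[k - 1]]
--         if k < len(bf):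
--             b = max(bf[k], 0)
--             r.extend(range(starts[k + 1] + off * b, starts[k + 1] + (off + 1) * b))
--         return r
--
--     return n, [row(i) for i in range(n)]
-- ===== Notes on version B (the rewrite author's own statement) =====
-- stated objective: alternative
-- what changed: Replaced A's stateful BFS construction (create nodes one by one, appending child indices into already-stored parent rows) by a closed-form scheme: layer sizes and start offsets are precomputed by prefix sums, and each adjacency row is then emitted independently as a pure function of the node index (its layer found by ranking the index among the start boundaries, parent and children obtained by index arithmetic); no row is ever mutated.
import Mathlib
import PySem

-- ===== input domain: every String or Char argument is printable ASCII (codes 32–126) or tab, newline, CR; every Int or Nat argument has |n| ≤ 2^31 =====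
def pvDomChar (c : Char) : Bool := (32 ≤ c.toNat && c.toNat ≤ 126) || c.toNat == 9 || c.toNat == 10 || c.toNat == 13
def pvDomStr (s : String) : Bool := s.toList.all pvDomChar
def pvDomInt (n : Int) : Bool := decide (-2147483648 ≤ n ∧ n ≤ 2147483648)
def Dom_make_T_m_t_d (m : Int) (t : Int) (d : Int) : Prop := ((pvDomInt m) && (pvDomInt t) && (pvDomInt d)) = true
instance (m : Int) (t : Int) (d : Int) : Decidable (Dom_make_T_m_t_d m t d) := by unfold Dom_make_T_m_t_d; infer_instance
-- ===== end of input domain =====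

-- B replaces A's stateful BFS construction by a closed-form scheme (prefix sums
-- of layer sizes, each row a pure function of the node index); alternative
-- decomposition of the same cost, proved to return the same value on all inputs.

-- ===== PORT A =====
-- inner body of A's nested creation loops: u = len(adj); adj.append([]);
-- adj[v].append(u); adj[u].append(v); next_layer.append(u)
def pvChildStep (v : Nat) (st : List (List Int) × List Nat) : List (List Int) × List Nat :=
  let adj := st.1
  let u := adj.length
  let adj := adj ++ [([] : List Int)]
  let adj := adj.modify v (fun r => r ++ [(u : Int)])
  let adj := adj.modify u (fun r => r ++ [(v : Int)])
  (adj, st.2 ++ [u])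

-- one iteration of A's `for level in range(d)` body (next_layer starts empty)
def pvLevel (bf : Int) (st : List (List Int) × List Nat) : List (List Int) × List Nat :=
  st.2.foldl (fun s v => (PySem.List.pyRange 0 bf 1).foldl (fun s2 _ => pvChildStep v s2) s)
    (st.1, ([] : List Nat))

def make_T_m_t_d (m : Int) (t : Int) (d : Int) : Int × List (List Int) :=
  let st := (PySem.List.pyRange 0 d 1).foldl
    (fun st level =>
      let bf := if level == 0 then m else t
      pvLevel bf st) ([([] : List Int)], [0])
  -- final layer: each v in current_layer gets 1 leaf child
  let adj := st.2.foldl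
    (fun (adj : List (List Int)) (v : Nat) =>
      let u := adj.length
      let adj2 := adj ++ [([] : List Int)]
      let adj3 := adj2.modify v (fun r => r ++ [(u : Int)])
      adj3.modify u (fun r => r ++ [(v : Int)])) st.1
  ((adj.length : Int), adj)

-- ===== PORT B =====
-- B's inner `row(i)`: the layer k of node i is found by ranking i among the
-- start boundaries; the row is [parent?] ++ contiguous children range
def pvRowB (bf starts : List Int) (i : Int) : List Int :=
  let k := (starts.drop 1).countP (fun s => decide (s ≤ i))
  let off := i - starts.getD k 0
  let r := if k == 0 then ([] : List Int)
           else [starts.getD (k - 1) 0 + PySem.Int.floordiv off (bf.getD (k - 1) 0)]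
  if k < bf.length then
    r ++ PySem.List.pyRange (starts.getD (k + 1) 0 + off * max (bf.getD k 0) 0)
          (starts.getD (k + 1) 0 + (off + 1) * max (bf.getD k 0) 0) 1
  else r

def make_T_m_t_d_alt (m : Int) (t : Int) (d : Int) : Int × List (List Int) :=
  let bf := (PySem.List.pyRange 0 (max d 0) 1).map (fun k => if k == 0 then m else t) ++ [1]
  let sizes := bf.foldl (fun (sz : List Int) b => sz ++ [sz.getLast! * max b 0]) [1]
  let starts := sizes.foldl (fun (st : List Int) s => st ++ [st.getLast! + s]) [0]
  let n := starts.getLast!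
  (n, (PySem.List.pyRange 0 n 1).map (fun i => pvRowB bf starts i))

-- ===== PRECONDITION & SPEC =====
def Spec_make_T_m_t_d (m : Int) (t : Int) (d : Int) (out : Int × List (List Int)) : Prop := out = make_T_m_t_d_alt m t d
instance (m : Int) (t : Int) (d : Int) (out : Int × List (List Int)) : Decidable (Spec_make_T_m_t_d m t d out) := by unfold Spec_make_T_m_t_d; infer_instance

-- ===== CLAIM (what is proved, stated in full; the proofs are below) =====
def Claim_equal_make_T_m_t_d : Prop := ∀ (m : Int) (t : Int) (d : Int), Dom_make_T_m_t_d m t d → Spec_make_T_m_t_d m t d (make_T_m_t_d m t d)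

-- ===== LEMMAS AND PROOFS =====

-- Abstract layer state for A's invariant: adjB = finished rows,
-- ps/s/n/pbn = previous-layer start, current-layer start, current-layer size
-- and the branching factor that produced the current layer.
structure PVSt where
  adjB : List (List Int)
  ps : Nat
  s : Nat
  n : Nat
  pbn : Nat

-- parent part of the row of the node at offset `off` of the current layer
def pvEntry (ps s pbn off : Nat) : List Int :=
  if s = 0 then ([] : List Int) else [((ps + off / pbn : Nat) : Int)]

-- children part: `bn` consecutive indices starting at base + off * bn
def pvKids (base bn off : Nat) : List Int :=
  (List.range bn).map (fun k => ((base + off * bn + k : Nat) : Int))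

-- rows of the current layer that still lack their children
def pvPend (st : PVSt) : List (List Int) :=
  (List.range st.n).map (fun off => pvEntry st.ps st.s st.pbn off)

-- abstract effect of one branching factor on the layer state
def pvStep (st : PVSt) (b0 : Int) : PVSt :=
  ⟨st.adjB ++ (List.range st.n).map
      (fun off => pvEntry st.ps st.s st.pbn off ++ pvKids (st.s + st.n) b0.toNat off),
   st.s, st.s + st.n, st.n * b0.toNat, b0.toNat⟩

def pvEvolve (L : List Int) (st : PVSt) : PVSt := L.foldl pvStep st

def pvSt0 : PVSt := ⟨[], 0, 0, 1, 1⟩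

-- closed-form layer sizes and start offsets over the branching list bs
def pvSz (bs : List Int) : Nat → Nat
  | 0 => 1
  | k + 1 => pvSz bs k * (bs.getD k 0).toNat

def pvSt (bs : List Int) : Nat → Nat
  | 0 => 0
  | k + 1 => pvSt bs k + pvSz bs k

-- all rows emitted by evolving through the branching list (A's whole output)
def pvF : List Int → Nat → Nat → Nat → Nat → List (List Int)
  | [], _, _, _, _ => []
  | b :: bs, ps, s, n, pbn =>
    (List.range n).map (fun off => pvEntry ps s pbn off ++ pvKids (s + n) b.toNat off)
      ++ pvF bs s (s + n) (n * b.toNat) b.toNat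

-- completed rows of one layer, children starting at index L
def pvRowsDone (R : Nat → List Int) (L bn n : Nat) : List (List Int) :=
  (List.range n).map (fun j => R j ++ (List.range bn).map (fun k => ((L + j * bn + k : Nat) : Int)))

-- parent-only rows of the freshly created nodes
def pvNewRows (s bn n : Nat) : List (List Int) :=
  (List.range n).flatMap (fun j => List.replicate bn [((s + j : Nat) : Int)])

-- indices of the freshly created nodes (A's next_layer)
def pvNewIdx (L bn n : Nat) : List Nat :=
  (List.range (n * bn)).map (fun i => L + i)

lemma pv_modify_append_of_lt {α : Type} (xs ys : List α) (i : Nat) (f : α → α)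
    (h : i < xs.length) : (xs ++ ys).modify i f = xs.modify i f ++ ys := by
  induction xs generalizing i with
  | nil => simp at h
  | cons x xs ih =>
    cases i with
    | zero => simp [List.modify_zero_cons]
    | succ j => simp only [List.cons_append, List.modify_succ_cons]; rw [ih]; simpa using h

lemma pv_modify_append_length {α : Type} (xs : List α) (y : α) (ys : List α) (f : α → α)
    (i : Nat) (hi : i = xs.length) : (xs ++ y :: ys).modify i f = xs ++ f y :: ys := by
  subst hi
  induction xs with
  | nil => simp [List.modify_zero_cons]
  | cons x xs ih => simp [List.modify_succ_cons, ih]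

lemma pv_foldl_ignore {α β : Type} (l : List β) (g : α → α) (init : α) :
    l.foldl (fun s _ => g s) init = g^[l.length] init := by
  induction l generalizing init with
  | nil => rfl
  | cons x l ih => simp [ih, Function.iterate_succ_apply]

lemma pvChildStep_eq (v : Nat) (adj : List (List Int)) (nx : List Nat) (h : v < adj.length) :
    pvChildStep v (adj, nx) =
      (adj.modify v (fun r => r ++ [(adj.length : Int)]) ++ [[(v : Int)]], nx ++ [adj.length]) := by
  simp only [pvChildStep]
  rw [pv_modify_append_of_lt _ _ _ _ h,
    pv_modify_append_length _ _ _ _ _ (List.length_modify _ _ _).symm]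
  simp

lemma pvChildIter (bn : Nat) : ∀ (v : Nat) (adj : List (List Int)) (nx : List Nat),
    v < adj.length →
    (pvChildStep v)^[bn] (adj, nx) =
      (adj.modify v (fun r => r ++ (List.range bn).map (fun k => ((adj.length + k : Nat) : Int)))
        ++ List.replicate bn [(v : Int)],
       nx ++ (List.range bn).map (fun k => adj.length + k)) := by
  induction bn with
  | zero =>
    intro v adj nx h
    simp
    exact (List.modify_id v adj).symm
  | succ bn ih =>
    intro v adj nx h
    have hcons : (List.range (bn + 1)).map (fun k => ((adj.length + k : Nat) : Int))
        = (adj.length : Int) :: (List.range bn).map (fun k => ((adj.length + 1 + k : Nat) : Int)) := by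
      rw [List.range_succ_eq_map, List.map_cons, List.map_map]
      refine List.cons_eq_cons.mpr ⟨by norm_num, List.map_congr_left ?_⟩
      intro a _
      exact congrArg (fun x : Nat => (x : Int)) (by omega)
    have hconsN : (List.range (bn + 1)).map (fun k => adj.length + k)
        = adj.length :: (List.range bn).map (fun k => adj.length + 1 + k) := by
      rw [List.range_succ_eq_map, List.map_cons, List.map_map]
      refine List.cons_eq_cons.mpr ⟨by norm_num, List.map_congr_left ?_⟩
      intro a _
      simp only [Function.comp_apply]
      omega
    have hmlen : (adj.modify v (fun r => r ++ [(adj.length : Int)])).length = adj.length :=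
      List.length_modify _ _ _
    have hv' : v < (adj.modify v (fun r => r ++ [(adj.length : Int)]) ++ [[(v : Int)]]).length := by
      rw [List.length_append, hmlen]
      simp only [List.length_cons, List.length_nil]
      omega
    rw [Function.iterate_succ_apply, pvChildStep_eq v adj nx h, ih v _ (nx ++ [adj.length]) hv']
    have hL : (adj.modify v (fun r => r ++ [(adj.length : Int)]) ++ [[(v : Int)]]).length
        = adj.length + 1 := by
      rw [List.length_append, hmlen]
      simp
    rw [hL, pv_modify_append_of_lt _ _ _ _ (by rw [hmlen]; exact h), List.modify_modify_eq,
      hcons, hconsN]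
    simp only [Prod.mk.injEq]
    refine ⟨?_, ?_⟩
    · have hfun : ((fun r => r ++ (List.range bn).map (fun k => ((adj.length + 1 + k : Nat) : Int)))
            ∘ (fun r => r ++ [(adj.length : Int)]))
          = fun r => r ++ (adj.length : Int)
              :: (List.range bn).map (fun k => ((adj.length + 1 + k : Nat) : Int)) := by
        funext r
        simp [List.append_assoc]
      rw [hfun]
      simp [List.append_assoc, List.replicate_succ]
    · simp [List.append_assoc]

lemma pvRowsDone_succ (R : Nat → List Int) (L bn n : Nat) :
    pvRowsDone R L bn (n + 1) =
      (R 0 ++ (List.range bn).map (fun k => ((L + k : Nat) : Int)))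
        :: pvRowsDone (fun j => R (j + 1)) (L + bn) bn n := by
  unfold pvRowsDone
  rw [List.range_succ_eq_map, List.map_cons, List.map_map]
  congr 1
  · simp
  · apply List.map_congr_left
    intro j _
    simp only [Function.comp_apply]
    congr 1
    apply List.map_congr_left
    intro k _
    congr 1
    rw [Nat.succ_eq_add_one]
    ring

lemma pvNewRows_succ (s bn n : Nat) :
    pvNewRows s bn (n + 1) = List.replicate bn [(s : Int)] ++ pvNewRows (s + 1) bn n := by
  unfold pvNewRows
  rw [List.range_succ_eq_map, List.flatMap_cons, List.flatMap_map]
  congr 1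
  apply List.flatMap_congr
  intro j _
  refine congrArg (fun x : Int => List.replicate bn [x]) ?_
  push_cast
  ring

lemma pvNewIdx_succ (L bn n : Nat) :
    pvNewIdx L bn (n + 1) = (List.range bn).map (fun k => L + k) ++ pvNewIdx (L + bn) bn n := by
  unfold pvNewIdx
  have h1 : (n + 1) * bn = bn + n * bn := by ring
  rw [h1, List.range_add, List.map_append, List.map_map]
  congr 1
  apply List.map_congr_left
  intro i _
  simp only [Function.comp_apply]
  omega

-- effect of processing one full layer of pending rows, bn children per node
lemma pvLevelRows (bn : Nat) : ∀ (n : Nat) (R : Nat → List Int)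
    (adjB tail : List (List Int)) (nx : List Nat),
    (List.range' adjB.length n).foldl (fun st v => (pvChildStep v)^[bn] st)
      (adjB ++ (List.range n).map R ++ tail, nx) =
      (adjB ++ pvRowsDone R (adjB.length + n + tail.length) bn n ++ tail
          ++ pvNewRows adjB.length bn n,
       nx ++ pvNewIdx (adjB.length + n + tail.length) bn n) := by
  intro n
  induction n with
  | zero =>
    intro R adjB tail nx
    simp [pvRowsDone, pvNewRows, pvNewIdx]
  | succ n ih =>
    intro R adjB tail nx
    rw [List.range'_succ, List.foldl_cons]
    have hsplit : adjB ++ (List.range (n + 1)).map R ++ tail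
        = adjB ++ R 0 :: ((List.range n).map (fun j => R (j + 1)) ++ tail) := by
      rw [List.range_succ_eq_map, List.map_cons, List.map_map]
      simp [Function.comp]
    rw [hsplit]
    have hv : adjB.length
        < (adjB ++ R 0 :: ((List.range n).map (fun j => R (j + 1)) ++ tail)).length := by
      simp
    rw [pvChildIter bn adjB.length _ nx hv]
    have hLEN : (adjB ++ R 0 :: ((List.range n).map (fun j => R (j + 1)) ++ tail)).length
        = adjB.length + (n + 1) + tail.length := by simp; omega
    rw [hLEN]
    rw [pv_modify_append_length _ _ _ _ _ rfl]
    have hshape : (adjB ++ (R 0 ++ (List.range bn).map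
            (fun k => ((adjB.length + (n + 1) + tail.length + k : Nat) : Int)))
          :: ((List.range n).map (fun j => R (j + 1)) ++ tail))
        ++ List.replicate bn [(adjB.length : Int)]
        = (adjB ++ [R 0 ++ (List.range bn).map
            (fun k => ((adjB.length + (n + 1) + tail.length + k : Nat) : Int))])
          ++ (List.range n).map (fun j => R (j + 1))
          ++ (tail ++ List.replicate bn [(adjB.length : Int)]) := by
      simp
    rw [hshape]
    have hlen' : adjB.length + 1 = (adjB ++ [R 0 ++ (List.range bn).map
        (fun k => ((adjB.length + (n + 1) + tail.length + k : Nat) : Int))]).length := by simp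
    rw [hlen', ih]
    simp only [Prod.mk.injEq]
    have e1 : (adjB ++ [R 0 ++ (List.range bn).map
        (fun k => ((adjB.length + (n + 1) + tail.length + k : Nat) : Int))]).length
        = adjB.length + 1 := by simp
    have e2 : (tail ++ List.replicate bn [(adjB.length : Int)]).length = tail.length + bn := by
      simp
    refine ⟨?_, ?_⟩
    · rw [e1, e2, pvRowsDone_succ, pvNewRows_succ,
        show adjB.length + 1 + n + (tail.length + bn)
          = adjB.length + (n + 1) + tail.length + bn from by omega]
      simp [List.append_assoc]
    · rw [e1, e2, pvNewIdx_succ,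
        show adjB.length + 1 + n + (tail.length + bn)
          = adjB.length + (n + 1) + tail.length + bn from by omega]
      simp [List.append_assoc]

lemma pv_flatrep (bn n c : Nat) :
    pvNewRows c bn n = (List.range (n * bn)).map (fun off => [((c + off / bn : Nat) : Int)]) := by
  unfold pvNewRows
  rcases Nat.eq_zero_or_pos bn with hbn | hbn
  · subst hbn; simp
  · induction n with
    | zero => simp
    | succ n ih =>
      rw [List.range_succ, List.flatMap_append, ih,
        show (n + 1) * bn = n * bn + bn from by ring,
        List.range_add, List.map_append, List.map_map]
      congr 1
      simp only [List.flatMap_cons, List.flatMap_nil, List.append_nil]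
      have hcongr : ∀ x ∈ List.range bn,
          ((fun off => [((c + off / bn : Nat) : Int)]) ∘ (fun y => n * bn + y)) x
            = [((c + n : Nat) : Int)] := by
        intro x hx
        have hx' : x < bn := List.mem_range.mp hx
        have hdiv : (n * bn + x) / bn = n := by
          rw [Nat.mul_comm, Nat.mul_add_div hbn, Nat.div_eq_of_lt hx']
          omega
        simp only [Function.comp_apply, hdiv]
      rw [List.map_congr_left hcongr, List.map_const', List.length_range]

lemma pvLevel_eq (b0 : Int) (st : PVSt) (h : st.adjB.length = st.s) :
    pvLevel b0 (st.adjB ++ pvPend st, List.range' st.s st.n) =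
      ((pvStep st b0).adjB ++ pvPend (pvStep st b0),
       List.range' (pvStep st b0).s (pvStep st b0).n) := by
  have hinner : (fun (s : List (List Int) × List Nat) (v : Nat) =>
        (PySem.List.pyRange 0 b0 1).foldl (fun s2 _ => pvChildStep v s2) s)
      = fun s v => (pvChildStep v)^[b0.toNat] s := by
    funext s v
    rw [pv_foldl_ignore, PySem.List.length_pyRange_one, Int.sub_zero]
  simp only [pvLevel]
  rw [hinner, ← h]
  simp only [pvPend]
  have HH := pvLevelRows b0.toNat st.n (fun off => pvEntry st.ps st.s st.pbn off) st.adjB []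
    ([] : List Nat)
  simp only [List.length_nil, List.append_nil, Nat.add_zero] at HH
  rw [HH]
  simp only [pvStep, Prod.mk.injEq]
  refine ⟨?_, ?_⟩
  · have hrd : pvRowsDone (fun off => pvEntry st.ps st.s st.pbn off)
        (st.adjB.length + st.n) b0.toNat st.n
        = (List.range st.n).map
            (fun off => pvEntry st.ps st.s st.pbn off ++ pvKids (st.s + st.n) b0.toNat off) := by
      unfold pvRowsDone pvKids
      rw [← h]
    rw [hrd]
    congr 1
    rw [pv_flatrep]
    apply List.map_congr_left
    intro off hoff
    have hn : 0 < st.n := by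
      rcases Nat.eq_zero_or_pos st.n with h0 | h0
      · rw [h0] at hoff; simp at hoff
      · exact h0
    unfold pvEntry
    rw [if_neg (by omega), h]
  · rw [← h]
    unfold pvNewIdx
    rw [List.range'_eq_map_range]
    exact List.nil_append _

lemma pvStep_len (st : PVSt) (b0 : Int) (h : st.adjB.length = st.s) :
    (pvStep st b0).adjB.length = (pvStep st b0).s := by
  simp [pvStep, h]

lemma pvFoldA (L : List Int) : ∀ (st : PVSt), st.adjB.length = st.s →
    L.foldl (fun a b0 => pvLevel b0 a) (st.adjB ++ pvPend st, List.range' st.s st.n) =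
      ((pvEvolve L st).adjB ++ pvPend (pvEvolve L st),
       List.range' (pvEvolve L st).s (pvEvolve L st).n) := by
  induction L with
  | nil => intro st h; rfl
  | cons b0 L ih =>
    intro st h
    simp only [List.foldl_cons, pvEvolve] at *
    rw [pvLevel_eq b0 st h, ih (pvStep st b0) (pvStep_len st b0 h)]

lemma pvLeafFold : ∀ (cur : List Nat) (adj : List (List Int)) (nx : List Nat),
    cur.foldl (fun (adj : List (List Int)) (v : Nat) =>
        ((adj ++ [([] : List Int)]).modify v (fun r => r ++ [(adj.length : Int)])).modify
          adj.length (fun r => r ++ [(v : Int)])) adj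
      = (cur.foldl (fun s v => pvChildStep v s) (adj, nx)).1 := by
  intro cur
  induction cur with
  | nil => intro adj nx; rfl
  | cons v cur ih =>
    intro adj nx
    simp only [List.foldl_cons]
    exact ih _ _

-- adjB of an evolution = the accumulated rows plus pvF of the branching list
lemma pvEvolve_adjB (L : List Int) : ∀ (adjB : List (List Int)) (ps s n pbn : Nat),
    (pvEvolve L ⟨adjB, ps, s, n, pbn⟩).adjB = adjB ++ pvF L ps s n pbn := by
  induction L with
  | nil => intro adjB ps s n pbn; simp [pvEvolve, pvF]
  | cons b L ih =>
    intro adjB ps s n pbn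
    simp only [pvEvolve, List.foldl_cons] at *
    rw [show pvStep ⟨adjB, ps, s, n, pbn⟩ b
        = ⟨adjB ++ (List.range n).map
            (fun off => pvEntry ps s pbn off ++ pvKids (s + n) b.toNat off),
           s, s + n, n * b.toNat, b.toNat⟩ from rfl, ih, pvF, List.append_assoc]

-- ===== B-side lemmas =====

-- a generic "scanl by append" characterization of B's prefix-sum folds
lemma pv_fold_scan (f : Int → Nat → Int) (u : Nat → Int)
    (hu : ∀ k, u (k + 1) = f (u k) k) :
    ∀ (n j : Nat), (List.range' j n).foldl
        (fun (st : List Int) k => st ++ [f st.getLast! k]) ((List.range (j + 1)).map u)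
      = (List.range (j + 1 + n)).map u := by
  intro n
  induction n with
  | zero => intro j; rfl
  | succ n ih =>
    intro j
    rw [List.range'_succ, List.foldl_cons]
    have hlast : ((List.range (j + 1)).map u).getLast! = u j := by
      rw [List.range_succ, List.map_append]
      simp
    rw [hlast]
    have h2 : (List.range (j + 1)).map u ++ [f (u j) j] = (List.range (j + 2)).map u := by
      rw [List.range_succ (n := j + 1), List.map_append, List.map_singleton, hu j]
    rw [h2, ih (j + 1), show j + 1 + 1 + n = j + 1 + (n + 1) from by omega]

lemma pv_getD_map_range (u : Nat → Int) (n k : Nat) (h : k < n) :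
    ((List.range n).map u).getD k 0 = u k := by
  rw [List.getD_eq_getElem?_getD, List.getElem?_map, List.getElem?_range h]
  rfl

lemma pv_bs_getD (bf : List Int) (k : Nat) : (bf ++ [0]).getD k 0 = bf.getD k 0 := by
  rcases lt_or_ge k bf.length with h | h
  · rw [List.getD_eq_getElem?_getD, List.getD_eq_getElem?_getD, List.getElem?_append_left h]
  · have h2 : bf.getD k 0 = 0 := by
      rw [List.getD_eq_getElem?_getD, List.getElem?_eq_none h]
      rfl
    rw [h2]
    rcases Nat.eq_or_lt_of_le h with h' | h'
    · rw [List.getD_eq_getElem?_getD, List.getElem?_append_right h, ← h', Nat.sub_self]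
      rfl
    · rw [List.getD_eq_getElem?_getD, List.getElem?_eq_none (by simp; omega)]
      rfl

lemma pvSt_mono (bs : List Int) {a b : Nat} (h : a ≤ b) : pvSt bs a ≤ pvSt bs b := by
  induction b with
  | zero =>
    have h0 : a = 0 := by omega
    exact le_of_eq (congrArg (pvSt bs) h0)
  | succ b ih =>
    rcases Nat.eq_or_lt_of_le h with h' | h'
    · exact le_of_eq (congrArg (pvSt bs) h')
    · have h2 := ih (by omega)
      show pvSt bs a ≤ pvSt bs b + pvSz bs b
      omega

lemma pvSt_pos (bs : List Int) {j : Nat} (h : 1 ≤ j) : 1 ≤ pvSt bs j := by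
  have h1 : pvSt bs 1 = 1 := by simp [pvSt, pvSz]
  have := pvSt_mono bs h
  omega

-- counting boundaries ≤ i over range n
lemma pv_count_range (n j : Nat) (h : j ≤ n) :
    (List.range n).countP (fun q => decide (q < j)) = j := by
  induction n with
  | zero =>
    simp only [List.range_zero, List.countP_nil]
    omega
  | succ n ih =>
    rw [List.range_succ, List.countP_append]
    rcases Nat.eq_or_lt_of_le h with h' | h'
    · subst h'
      have hall : (List.range n).countP (fun q => decide (q < n + 1)) = n := by
        rw [List.countP_eq_length.mpr]
        · exact List.length_range
        · intro a ha
          simp only [decide_eq_true_eq]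
          have := List.mem_range.mp ha
          omega
      rw [hall]
      simp
    · have := ih (by omega)
      simp only [List.countP_cons, List.countP_nil]
      simp only [decide_eq_true_eq] at *
      rw [this]
      have : ¬ (n < j) := by omega
      simp [this]

-- the ranking in pvRowB finds the layer
lemma pv_count_layer (bs : List Int) (L2 j : Nat) (i : Int)
    (hj1 : j + 1 < L2) (hlo : (pvSt bs j : Int) ≤ i) (hhi : i < (pvSt bs (j + 1) : Int)) :
    (((List.range L2).map (fun k => ((pvSt bs k : Nat) : Int))).drop 1).countP
        (fun s => decide (s ≤ i)) = j := by
  have hd : (List.range L2).drop 1 = (List.range (L2 - 1)).map (fun q => q + 1) := by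
    cases L2 with
    | zero => rfl
    | succ L => rw [List.range_succ_eq_map]; simp
  rw [← List.map_drop, hd, List.map_map, List.countP_map]
  have hcongr : ∀ q ∈ List.range (L2 - 1),
      (((fun s => decide (s ≤ i)) ∘ (fun k => ((pvSt bs k : Nat) : Int)) ∘ (fun q => q + 1)) q
          = true)
        ↔ ((fun q => decide (q < j)) q = true) := by
    intro q hq
    simp only [Function.comp_apply, decide_eq_true_eq]
    constructor
    · intro hle
      by_contra hqj
      have hq1 : j + 1 ≤ q + 1 := by omega
      have := pvSt_mono bs hq1
      omega
    · intro hqj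
      have hq1 : q + 1 ≤ j := by omega
      have := pvSt_mono bs hq1
      omega
  rw [List.countP_congr hcongr, pv_count_range _ j (by omega)]

-- the row lemma: pvRowB at a node of layer j equals the corresponding pvF row
lemma pv_rowB_eq (bf : List Int) (j off : Nat) (ps pbn : Nat)
    (hj : j < (bf ++ [0]).length) (hoff : off < pvSz (bf ++ [0]) j)
    (hps : (j = 0 ∧ ps = 0 ∧ pbn = 1) ∨
           (1 ≤ j ∧ ps = pvSt (bf ++ [0]) (j - 1) ∧ pbn = ((bf ++ [0]).getD (j - 1) 0).toNat)) :
    pvRowB bf ((List.range (bf.length + 2)).map (fun k => ((pvSt (bf ++ [0]) k : Nat) : Int)))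
        ((pvSt (bf ++ [0]) j + off : Nat) : Int)
      = pvEntry ps (pvSt (bf ++ [0]) j) pbn off
          ++ pvKids (pvSt (bf ++ [0]) j + pvSz (bf ++ [0]) j) ((bf ++ [0]).getD j 0).toNat off := by
  have hL : (bf ++ [0]).length = bf.length + 1 := by simp
  have hst1 : pvSt (bf ++ [0]) (j + 1) = pvSt (bf ++ [0]) j + pvSz (bf ++ [0]) j := rfl
  have hk : (((List.range (bf.length + 2)).map
        (fun k => ((pvSt (bf ++ [0]) k : Nat) : Int))).drop 1).countP
        (fun s => decide (s ≤ ((pvSt (bf ++ [0]) j + off : Nat) : Int))) = j := by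
    apply pv_count_layer (bf ++ [0]) (bf.length + 2) j
    · omega
    · push_cast
      omega
    · rw [hst1]
      push_cast
      omega
  simp only [pvRowB]
  rw [hk, pv_getD_map_range _ _ j (by omega), pv_getD_map_range _ _ (j - 1) (by omega),
    pv_getD_map_range _ _ (j + 1) (by omega)]
  have hoffe : ((pvSt (bf ++ [0]) j + off : Nat) : Int) - ((pvSt (bf ++ [0]) j : Nat) : Int)
      = (off : Int) := by
    push_cast
    ring
  rw [hoffe]
  have hr : (if (j == 0) = true then ([] : List Int)
        else [((pvSt (bf ++ [0]) (j - 1) : Nat) : Int)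
                + PySem.Int.floordiv (off : Int) (bf.getD (j - 1) 0)])
      = pvEntry ps (pvSt (bf ++ [0]) j) pbn off := by
    rcases hps with ⟨hj0, hps0, hpbn0⟩ | ⟨hj1, hps1, hpbn1⟩
    · subst hj0
      simp [pvEntry, pvSt]
    · have hjne : (j == 0) = false := by
        simp only [beq_eq_false_iff_ne, ne_eq]
        omega
      rw [hjne]
      have hbpos : 0 < ((bf ++ [0]).getD (j - 1) 0).toNat := by
        have hs : pvSz (bf ++ [0]) j
            = pvSz (bf ++ [0]) (j - 1) * ((bf ++ [0]).getD (j - 1) 0).toNat := by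
          rw [show j = (j - 1) + 1 from by omega]
          rfl
        by_contra hc
        have hz : ((bf ++ [0]).getD (j - 1) 0).toNat = 0 := by omega
        rw [hs, hz, Nat.mul_zero] at hoff
        omega
      have hbf : bf.getD (j - 1) 0 = ((((bf ++ [0]).getD (j - 1) 0).toNat : Nat) : Int) := by
        rw [← pv_bs_getD bf (j - 1), Int.toNat_of_nonneg (by omega)]
      have hsne : pvSt (bf ++ [0]) j ≠ 0 := by
        have := pvSt_pos (bf ++ [0]) hj1
        omega
      rw [hbf, PySem.Int.floordiv_natCast, pvEntry, if_neg hsne, hps1, hpbn1]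
      refine congrArg (fun z => [z]) ?_
      push_cast
      ring
  rw [hr]
  by_cases hjb : j < bf.length
  · rw [if_pos hjb]
    congr 1
    have hb : max (bf.getD j 0) 0 = ((((bf ++ [0]).getD j 0).toNat : Nat) : Int) := by
      rw [← pv_bs_getD bf j]
      exact (Int.toNat_eq_max _).symm
    rw [hb, PySem.List.pyRange_one]
    have hdiff : (((pvSt (bf ++ [0]) (j + 1) : Nat) : Int)
          + ((off : Int) + 1) * ((((bf ++ [0]).getD j 0).toNat : Nat) : Int)
        - (((pvSt (bf ++ [0]) (j + 1) : Nat) : Int)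
          + (off : Int) * ((((bf ++ [0]).getD j 0).toNat : Nat) : Int))).toNat
        = ((bf ++ [0]).getD j 0).toNat := by
      have e1 : ((pvSt (bf ++ [0]) (j + 1) : Nat) : Int)
            + ((off : Int) + 1) * ((((bf ++ [0]).getD j 0).toNat : Nat) : Int)
          - (((pvSt (bf ++ [0]) (j + 1) : Nat) : Int)
            + (off : Int) * ((((bf ++ [0]).getD j 0).toNat : Nat) : Int))
          = ((((bf ++ [0]).getD j 0).toNat : Nat) : Int) := by ring
      rw [e1, Int.toNat_natCast]
    rw [hdiff]
    unfold pvKids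
    apply List.map_congr_left
    intro k _
    rw [hst1]
    push_cast
    ring
  · rw [if_neg hjb]
    have hj' : j = bf.length := by omega
    have h0 : (bf ++ [0]).getD j 0 = 0 := by
      subst hj'
      rw [List.getD_eq_getElem?_getD, List.getElem?_append_right (le_refl _), Nat.sub_self]
      rfl
    rw [h0]
    simp [pvKids]

-- pvF from layer j onward = the rows of the remaining node indices
lemma pvF_rows (bf : List Int) : ∀ (q j : Nat), j + q = (bf ++ [0]).length →
    ∀ (ps pbn : Nat),
    ((j = 0 ∧ ps = 0 ∧ pbn = 1) ∨
     (1 ≤ j ∧ ps = pvSt (bf ++ [0]) (j - 1) ∧ pbn = ((bf ++ [0]).getD (j - 1) 0).toNat)) →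
    pvF ((bf ++ [0]).drop j) ps (pvSt (bf ++ [0]) j) (pvSz (bf ++ [0]) j) pbn
      = (List.range' (pvSt (bf ++ [0]) j)
          (pvSt (bf ++ [0]) (bf ++ [0]).length - pvSt (bf ++ [0]) j)).map
          (fun i => pvRowB bf
            ((List.range (bf.length + 2)).map (fun k => ((pvSt (bf ++ [0]) k : Nat) : Int)))
            ((i : Nat) : Int)) := by
  intro q
  induction q with
  | zero =>
    intro j hq ps pbn _
    have hj : j = (bf ++ [0]).length := by omega
    subst hj
    rw [List.drop_length, Nat.sub_self]
    rfl
  | succ q ih =>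
    intro j hq ps pbn hps
    have hj : j < (bf ++ [0]).length := by omega
    have hdrop : (bf ++ [0]).drop j = (bf ++ [0]).getD j 0 :: (bf ++ [0]).drop (j + 1) := by
      rw [List.drop_eq_getElem_cons hj, List.getD_eq_getElem _ 0 hj]
    rw [hdrop]
    show (List.range (pvSz (bf ++ [0]) j)).map
        (fun off => pvEntry ps (pvSt (bf ++ [0]) j) pbn off
          ++ pvKids (pvSt (bf ++ [0]) j + pvSz (bf ++ [0]) j) ((bf ++ [0]).getD j 0).toNat off)
      ++ pvF ((bf ++ [0]).drop (j + 1)) (pvSt (bf ++ [0]) j)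
          (pvSt (bf ++ [0]) j + pvSz (bf ++ [0]) j)
          (pvSz (bf ++ [0]) j * ((bf ++ [0]).getD j 0).toNat) ((bf ++ [0]).getD j 0).toNat
      = _
    have hst1 : pvSt (bf ++ [0]) (j + 1) = pvSt (bf ++ [0]) j + pvSz (bf ++ [0]) j := rfl
    have hsz1 : pvSz (bf ++ [0]) (j + 1) = pvSz (bf ++ [0]) j * ((bf ++ [0]).getD j 0).toNat := rfl
    have hrec := ih (j + 1) (by omega) (pvSt (bf ++ [0]) j) (((bf ++ [0]).getD j 0).toNat)
      (Or.inr ⟨by omega, by simp, by simp⟩)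
    rw [← hst1, ← hsz1, hrec]
    have hmono := pvSt_mono (bf ++ [0]) (show j + 1 ≤ (bf ++ [0]).length from by omega)
    have hsum : pvSt (bf ++ [0]) (bf ++ [0]).length - pvSt (bf ++ [0]) j
        = pvSz (bf ++ [0]) j + (pvSt (bf ++ [0]) (bf ++ [0]).length - pvSt (bf ++ [0]) (j + 1)) := by
      rw [hst1] at *
      omega
    rw [hsum, ← List.range'_append_1, List.map_append, hst1]
    congr 1
    rw [List.range'_eq_map_range, List.map_map]
    apply List.map_congr_left
    intro off hoff
    exact (pv_rowB_eq bf j off ps pbn hj (List.mem_range.mp hoff) hps).symm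

-- ===== VERDICT (by name: the statement is the Claim_ definition above) =====
theorem make_T_m_t_d_spec : Claim_equal_make_T_m_t_d := by
  intro m t d _
  unfold Spec_make_T_m_t_d
  simp only [make_T_m_t_d, make_T_m_t_d_alt]
  have hR : PySem.List.pyRange 0 (max d 0) 1 = PySem.List.pyRange 0 d 1 := by
    rw [PySem.List.pyRange_one, PySem.List.pyRange_one]
    congr 2
    omega
  rw [hR]
  -- ---- A side: the BFS fold equals pvF over the branching list ----
  have hinit : (([([] : List Int)], [(0 : Nat)]) : List (List Int) × List Nat)
      = (pvSt0.adjB ++ pvPend pvSt0, List.range' pvSt0.s pvSt0.n) := by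
    simp [pvSt0, pvPend, pvEntry, List.range_succ]
  have hmap : (PySem.List.pyRange 0 d 1).foldl
      (fun st level => pvLevel (if level == 0 then m else t) st)
      (pvSt0.adjB ++ pvPend pvSt0, List.range' pvSt0.s pvSt0.n)
      = ((PySem.List.pyRange 0 d 1).map (fun k => if k == 0 then m else t)).foldl
          (fun a b0 => pvLevel b0 a)
          (pvSt0.adjB ++ pvPend pvSt0, List.range' pvSt0.s pvSt0.n) := by
    rw [List.foldl_map]
  have hall := pvFoldA ((PySem.List.pyRange 0 d 1).map (fun k => if k == 0 then m else t) ++ [1])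
    pvSt0 rfl
  rw [List.foldl_append] at hall
  simp only [List.foldl_cons, List.foldl_nil] at hall
  have hone : ∀ (p : List (List Int) × List Nat),
      pvLevel 1 p = (p.2.foldl (fun s v => pvChildStep v s) (p.1, ([] : List Nat))) := by
    intro p
    simp only [pvLevel]
    have h1 : PySem.List.pyRange 0 1 1 = [(0 : Int)] := by decide
    rw [h1]
    simp only [List.foldl_cons, List.foldl_nil]
  rw [hone] at hall
  rw [hinit, hmap]
  have hA := pvLeafFold
    (((PySem.List.pyRange 0 d 1).map (fun k => if k == 0 then m else t)).foldl
      (fun a b0 => pvLevel b0 a) (pvSt0.adjB ++ pvPend pvSt0, List.range' pvSt0.s pvSt0.n)).2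
    (((PySem.List.pyRange 0 d 1).map (fun k => if k == 0 then m else t)).foldl
      (fun a b0 => pvLevel b0 a) (pvSt0.adjB ++ pvPend pvSt0, List.range' pvSt0.s pvSt0.n)).1
    ([] : List Nat)
  rw [hA, hall]
  have hstep0 : ∀ (E : PVSt), (pvStep E 0).adjB = E.adjB ++ pvPend E := by
    intro E
    simp [pvStep, pvPend, pvKids]
  have hev : pvEvolve (((PySem.List.pyRange 0 d 1).map (fun k => if k == 0 then m else t) ++ [1])
        ++ [0]) pvSt0
      = pvStep (pvEvolve ((PySem.List.pyRange 0 d 1).map (fun k => if k == 0 then m else t) ++ [1])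
          pvSt0) 0 := by
    simp [pvEvolve, List.foldl_append]
  rw [← hstep0, ← hev]
  have hSt0 : pvSt0 = ⟨[], 0, 0, 1, 1⟩ := rfl
  rw [hSt0, pvEvolve_adjB, List.nil_append]
  set bfv := (PySem.List.pyRange 0 d 1).map (fun k => if k == 0 then m else t) ++ [1]
    with hbfv
  -- abbreviate the branching list
  have hF := pvF_rows bfv
    ((bfv ++ [0]).length)
    0 (Nat.zero_add _) 0 1 (Or.inl ⟨rfl, rfl, rfl⟩)
  rw [List.drop_zero] at hF
  have hF2 : pvF (bfv ++ [0])
        0 0 1 1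
      = (List.range' 0
          (pvSt (bfv ++ [0])
            ((bfv ++ [0]).length))).map
          (fun i => pvRowB bfv
            ((List.range (bfv.length + 2)).map
              (fun k => ((pvSt (bfv ++ [0]) k : Nat) : Int)))
            ((i : Nat) : Int)) := hF
  rw [hF2]
  -- ---- B side: the two prefix-sum folds ----
  have hu1 : ∀ k, ((pvSz (bfv ++ [0]) (k + 1) : Nat) : Int)
      = ((pvSz (bfv ++ [0]) k : Nat) : Int)
        * max (bfv.getD k 0) 0 := by
    intro k
    rw [show pvSz (bfv ++ [0]) (k + 1)
        = pvSz (bfv ++ [0]) k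
          * ((bfv ++ [0]).getD k 0).toNat from rfl,
      pv_bs_getD]
    push_cast
    rw [Int.toNat_eq_max]
  have hbf_as : bfv
      = (List.range' 0 bfv.length).map
          (fun k => bfv.getD k 0) := by
    apply List.ext_getElem
    · simp
    · intro i h1 h2
      rw [List.getElem_map, List.getElem_range', List.getD_eq_getElem _ 0 (by simpa using h2)]
      simp
  have hsizes : bfv.foldl
        (fun (sz : List Int) b => sz ++ [sz.getLast! * max b 0]) [1]
      = (List.range (bfv.length + 1)).map
          (fun k => ((pvSz (bfv ++ [0]) k : Nat) : Int)) := by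
    conv_lhs => rw [hbf_as]
    rw [List.foldl_map]
    have h0 := pv_fold_scan
      (fun x k => x * max (bfv.getD k 0) 0)
      (fun k => ((pvSz (bfv ++ [0]) k : Nat) : Int))
      hu1 bfv.length 0
    simp only [Nat.zero_add] at h0
    rw [show bfv.length + 1 = 1 + bfv.length from Nat.add_comm _ _]
    exact h0
  have hu2 : ∀ k, ((pvSt (bfv ++ [0]) (k + 1) : Nat) : Int)
      = ((pvSt (bfv ++ [0]) k : Nat) : Int)
        + ((pvSz (bfv ++ [0]) k : Nat) : Int) := by
    intro k
    rw [show pvSt (bfv ++ [0]) (k + 1)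
        = pvSt (bfv ++ [0]) k
          + pvSz (bfv ++ [0]) k from rfl]
    push_cast
    ring
  have hstarts : ((List.range (bfv.length + 1)).map
          (fun k => ((pvSz (bfv ++ [0]) k : Nat) : Int))).foldl
        (fun (st : List Int) s => st ++ [st.getLast! + s]) [0]
      = (List.range (bfv.length + 2)).map
          (fun k => ((pvSt (bfv ++ [0]) k : Nat) : Int)) := by
    rw [List.foldl_map, List.range_eq_range']
    have h0 := pv_fold_scan
      (fun x k => x + ((pvSz (bfv ++ [0]) k : Nat) : Int))
      (fun k => ((pvSt (bfv ++ [0]) k : Nat) : Int))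
      hu2 (bfv.length + 1) 0
    simp only [Nat.zero_add] at h0
    rw [show bfv.length + 2 = 1 + (bfv.length + 1) from by omega]
    exact h0
  rw [hsizes, hstarts]
  have hlast2 : ((List.range (bfv.length + 2)).map
        (fun k => ((pvSt (bfv ++ [0]) k : Nat) : Int))).getLast!
      = ((pvSt (bfv ++ [0])
          (bfv.length + 1) : Nat) : Int) := by
    rw [List.range_succ, List.map_append]
    simp
  rw [hlast2]
  have hBL : (bfv ++ [0]).length
      = bfv.length + 1 := by
    simp
  rw [hBL]
  -- ---- both sides are now maps over the same index range ----
  rw [PySem.List.pyRange_one]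
  have htn : ((((pvSt (bfv ++ [0])
        (bfv.length + 1) : Nat) : Int) - 0)).toNat
      = pvSt (bfv ++ [0])
          (bfv.length + 1) := by
    simp
  rw [htn, List.range'_eq_map_range, List.map_map, List.map_map]
  refine Prod.ext ?_ ?_
  · simp
  · simp only []
    apply List.map_congr_left
    intro i _
    simp only [Function.comp_apply]
    norm_num
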